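-- pv_equiv track=rewrite | github.com/MING9UCCI/CodingTest_Python | 프로그래머스/0/120815. 피자 나눠 먹기 （2）/피자 나눠 먹기 （2）.py | solution
-- ===== SOURCE A (Python) =====
-- def solution(n):
--     answer = 0
--     pizza = 6
--     while 1:
--         if pizza % n == 0:
--             return pizza // 6
--         else:
--             pizza += 6
-- ===== SOURCE B (Python) =====
-- def solution(n):
--     # Euclid's algorithm: answer = |n| // gcd(6, n), O(log n) instead of A's linear scan.
--     a, b = 6, abs(n)
--     while b:
--         a, b = b, a % b
--     return abs(n) // a
-- ===== Notes on version B (the rewrite author's own statement) =====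
-- stated objective: faster
-- what changed: Replaces A's linear scan over multiples of 6 with Euclid's gcd algorithm and the closed form |n| // gcd(6, n).
import Mathlib
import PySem

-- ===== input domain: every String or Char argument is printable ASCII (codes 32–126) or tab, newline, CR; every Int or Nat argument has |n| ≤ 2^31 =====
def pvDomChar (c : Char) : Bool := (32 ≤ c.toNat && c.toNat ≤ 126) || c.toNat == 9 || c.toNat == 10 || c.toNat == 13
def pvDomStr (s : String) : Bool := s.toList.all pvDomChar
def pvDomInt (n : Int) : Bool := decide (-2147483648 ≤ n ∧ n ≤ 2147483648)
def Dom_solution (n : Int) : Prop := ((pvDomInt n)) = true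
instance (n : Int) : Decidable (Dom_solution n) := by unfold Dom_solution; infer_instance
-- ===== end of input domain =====

-- B replaces A's linear scan over multiples of 6 by Euclid's gcd and the closed form |n| // gcd(6, n) (asymptotically faster).

-- ===== PORT A =====
-- A's 'while 1' loop over pizza = 6, 12, …; the fuel n.natAbs only makes it total
-- (for n ≠ 0 the loop provably returns within n.natAbs iterations).
def solutionLoop (n : Int) (pizza : Int) : Nat → Int
  | 0 => 0
  | fuel + 1 =>
    if PySem.Int.mod pizza n = 0 then PySem.Int.floordiv pizza 6
    else solutionLoop n (pizza + 6) fuel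

def solution (n : Int) : Int := solutionLoop n 6 n.natAbs

-- ===== PORT B =====
-- Source B's Euclid loop: while b: a, b = b, a % b  (Python %)
def gcdLoop (a b : Int) : Int :=
  if hb : b = 0 then a else gcdLoop b (PySem.Int.mod a b)
termination_by b.natAbs
decreasing_by
  rcases lt_or_gt_of_ne hb with h | h
  · have := PySem.Int.mod_neg_bounds a h; omega
  · have h1 := PySem.Int.mod_nonneg a h; have h2 := PySem.Int.mod_lt a h; omega

def solution_alt (n : Int) : Int := PySem.Int.floordiv |n| (gcdLoop 6 |n|)

-- ===== PRECONDITION & SPEC =====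
-- Pre_ excludes exactly n = 0, where A raises ZeroDivisionError (pizza % 0).
def Pre_solution (n : Int) : Prop := n ≠ 0
instance (n : Int) : Decidable (Pre_solution n) := by unfold Pre_solution; infer_instance
def pvWitness_solution : Int := 7

def Spec_solution (n : Int) (out : Int) : Prop := out = solution_alt n
instance (n : Int) (out : Int) : Decidable (Spec_solution n out) := by unfold Spec_solution; infer_instance

-- ===== CLAIM (what is proved, stated in full; the proofs are below) =====
def Claim_equal_solution : Prop := ∀ (n : Int), Dom_solution n → Pre_solution n → Spec_solution n (solution n)

-- ===== LEMMAS AND PROOFS =====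

-- Euclid's loop computes Int.gcd on nonnegative inputs.
theorem gcdLoop_eq_gcd (a b : Int) (ha : 0 ≤ a) (hb : 0 ≤ b) :
    gcdLoop a b = Int.gcd a b := by
  rw [gcdLoop]
  split_ifs with h
  · subst h; simp [Int.gcd, Int.natAbs_of_nonneg ha]
  · have hbpos : 0 < b := lt_of_le_of_ne hb (Ne.symm h)
    rw [PySem.Int.mod_eq_emod_of_pos hbpos]
    have h1 : 0 ≤ a % b := Int.emod_nonneg a h
    have h2 : a % b < b := Int.emod_lt_of_pos a hbpos
    rw [gcdLoop_eq_gcd b (a % b) hb h1]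
    congr 1
    have hd : a % b = a - b * (a / b) := by rw [Int.emod_def]
    rw [hd, Int.gcd_comm a b]
    exact Int.gcd_sub_mul_left_right b a (a / b)
termination_by b.natAbs
decreasing_by omega

-- divisibility pivot: n ∣ 6k ↔ m ∣ k where m = lcm(6,n)/6
theorem dvd_six_iff (n : Int) (k : Nat) :
    (n ∣ 6 * (k : Int)) ↔ (Int.lcm 6 n / 6) ∣ k := by
  have h6L : 6 ∣ Int.lcm 6 n := by
    have := Int.dvd_lcm_left 6 n
    exact_mod_cast this
  have hL6 : Int.lcm 6 n = 6 * (Int.lcm 6 n / 6) := (Nat.mul_div_cancel' h6L).symm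
  constructor
  · intro h
    have h6k : (6 : Int) ∣ 6 * (k : Int) := ⟨(k : Int), rfl⟩
    have hlcm : (Int.lcm 6 n : Int) ∣ 6 * (k : Int) := by exact_mod_cast Int.lcm_dvd h6k h
    have : ((6 * (Int.lcm 6 n / 6) : Nat) : Int) ∣ ((6 * k : Nat) : Int) := by
      rw [← hL6]; push_cast; exact_mod_cast hlcm
    have hnat : 6 * (Int.lcm 6 n / 6) ∣ 6 * k := by exact_mod_cast this
    exact (Nat.mul_dvd_mul_iff_left (by norm_num : 0 < 6)).mp hnat
  · intro h
    have hnat : Int.lcm 6 n ∣ 6 * k := by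
      rw [hL6]; exact Nat.mul_dvd_mul_left 6 h
    have hc : (Int.lcm 6 n : Int) ∣ 6 * (k : Int) := by exact_mod_cast hnat
    exact (Int.dvd_lcm_right 6 n).trans hc

theorem loopA_eq (n : Int) (m : Nat)
    (hiff : ∀ k : Nat, (n ∣ 6 * (k : Int)) ↔ m ∣ k) :
    ∀ (f j : Nat), 1 ≤ j → j ≤ m → m < j + f →
      solutionLoop n (6 * (j : Int)) f = (m : Int) := by
  intro f
  induction f with
  | zero => intro j _ h2 h3; omega
  | succ f ih =>
    intro j h1 h2 h3
    rw [solutionLoop]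
    by_cases hd : m ∣ j
    · have hj : j = m := le_antisymm h2 (Nat.le_of_dvd (by omega) hd)
      have hz : PySem.Int.mod (6 * (j : Int)) n = 0 :=
        (PySem.Int.mod_eq_zero_iff_dvd _ _).mpr ((hiff j).mpr hd)
      rw [if_pos hz, hj]
      have : (6 : Int) * (m : Int) = ((6 * m : Nat) : Int) := by push_cast; ring
      rw [this]
      have h := PySem.Int.floordiv_natCast (6 * m) 6
      rw [Nat.mul_div_cancel_left m (by norm_num : 0 < 6)] at h
      exact_mod_cast h
    · have hz : ¬ PySem.Int.mod (6 * (j : Int)) n = 0 := by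
        rw [PySem.Int.mod_eq_zero_iff_dvd]
        exact fun h => hd ((hiff j).mp h)
      rw [if_neg hz]
      have harg : 6 * (j : Int) + 6 = 6 * ((j + 1 : Nat) : Int) := by push_cast; ring
      rw [harg]
      have hjm : j < m := lt_of_le_of_ne h2 (fun h => hd (h ▸ dvd_refl m))
      exact ih (j + 1) (by omega) (by omega) (by omega)

theorem solution_spec : Claim_equal_solution := by
  intro n _ hn
  unfold Spec_solution solution solution_alt
  set m := Int.lcm 6 n / 6 with hm
  -- facts about m
  have h6L : 6 ∣ Int.lcm 6 n := by exact_mod_cast Int.dvd_lcm_left 6 n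
  have hL6 : Int.lcm 6 n = 6 * m := (Nat.mul_div_cancel' h6L).symm
  have hLne : Int.lcm 6 n ≠ 0 := by
    have : 0 < Nat.lcm (6 : Int).natAbs n.natAbs :=
      Nat.pos_of_ne_zero (Nat.lcm_ne_zero (by norm_num) (Int.natAbs_ne_zero.mpr hn))
    simp only [Int.lcm]
    omega
  have hm1 : 1 ≤ m := by
    rcases Nat.eq_zero_or_pos m with h | h
    · rw [h, Nat.mul_zero] at hL6; exact absurd hL6 hLne
    · exact h
  have hiff := dvd_six_iff n
  rw [← hm] at hiff
  -- m ≤ n.natAbs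
  have hmabs : m ∣ n.natAbs := by
    have h1 : n ∣ 6 * ((n.natAbs : Nat) : Int) :=
      dvd_mul_of_dvd_right (Int.dvd_natAbs.mpr dvd_rfl) 6
    exact (hiff n.natAbs).mp h1
  have habs0 : 0 < n.natAbs := Int.natAbs_pos.mpr hn
  have hmle : m ≤ n.natAbs := Nat.le_of_dvd habs0 hmabs
  -- A side
  have hA : solutionLoop n 6 n.natAbs = (m : Int) := by
    have h6 : (6 : Int) = 6 * ((1 : Nat) : Int) := by norm_num
    rw [h6]
    exact loopA_eq n m hiff n.natAbs 1 le_rfl hm1 (by omega)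
  rw [hA]
  -- B side
  have hg : gcdLoop 6 |n| = Int.gcd 6 n := by
    rw [gcdLoop_eq_gcd 6 |n| (by norm_num) (abs_nonneg n)]
    congr 1
    simp [Int.gcd, Int.natAbs_abs]
  rw [hg]
  set g := Int.gcd 6 n with hgdef
  have hgne : g ≠ 0 := by
    simp [hgdef, Int.gcd_eq_zero_iff]
  -- g * (6 * m) = 6 * n.natAbs
  have hkey : g * Int.lcm 6 n = 6 * n.natAbs := by
    rw [hgdef, Int.gcd_mul_lcm 6 n]
    norm_num
  rw [hL6] at hkey
  have hmg : m * g = n.natAbs := by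
    have : 6 * (m * g) = 6 * n.natAbs := by rw [← hkey]; ring
    omega
  have habs : |n| = ((n.natAbs : Nat) : Int) := by
    exact_mod_cast (Int.abs_eq_natAbs n)
  rw [habs, PySem.Int.floordiv_natCast]
  rw [← hmg, Nat.mul_div_cancel m (Nat.pos_of_ne_zero hgne)]
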